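-- pv_equiv track=rewrite | github.com/Tiago84Barros/Dashboard | pickup/cvm_to_ticker_sync.py | _pick_best_ticker
-- ===== SOURCE A (Python) =====
-- from typing import Optional, Tuple
--
-- def _pick_best_ticker(tickers: list[str]) -> Optional[str]:
--     """
--     Heurística para escolher UM ticker por CVM (mantendo compatibilidade com teu CSV atual).
--     Preferência típica: ON(3) > PN(4) > UNIT(11) > outros.
--     """
--     if not tickers:
--         return None
--     uniq = sorted({t.strip().upper() for t in tickers if t and str(t).strip()})
--     if not uniq:
--         return None
--
--     def score(t: str) -> tuple[int, str]:
--         # menor score = melhor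
--         if t.endswith("3"):
--             s = 0
--         elif t.endswith("4"):
--             s = 1
--         elif t.endswith("11"):
--             s = 2
--         else:
--             s = 9
--         return (s, t)
--
--     return sorted(uniq, key=score)[0]
-- ===== SOURCE B (Python) =====
-- def _pick_best_ticker(tickers):
--     norm = {t.strip().upper() for t in tickers if t and str(t).strip()}
--     if not norm:
--         return None
--     buckets = {0: [], 1: [], 2: [], 9: []}
--     for t in norm:
--         if t.endswith("3"):
--             buckets[0].append(t)
--         elif t.endswith("4"):
--             buckets[1].append(t)
--         elif t.endswith("11"):
--             buckets[2].append(t)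
--         else:
--             buckets[9].append(t)
--     for lvl in (0, 1, 2, 9):
--         if buckets[lvl]:
--             return min(buckets[lvl])
--     return None
-- ===== Notes on version B (the rewrite author's own statement) =====
-- stated objective: alternative
-- what changed: Replaces A's stable sort of the normalized set under the tuple key (score, ticker) by a single bucketing pass into four priority buckets followed by min() of the first non-empty bucket.
import Mathlib
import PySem

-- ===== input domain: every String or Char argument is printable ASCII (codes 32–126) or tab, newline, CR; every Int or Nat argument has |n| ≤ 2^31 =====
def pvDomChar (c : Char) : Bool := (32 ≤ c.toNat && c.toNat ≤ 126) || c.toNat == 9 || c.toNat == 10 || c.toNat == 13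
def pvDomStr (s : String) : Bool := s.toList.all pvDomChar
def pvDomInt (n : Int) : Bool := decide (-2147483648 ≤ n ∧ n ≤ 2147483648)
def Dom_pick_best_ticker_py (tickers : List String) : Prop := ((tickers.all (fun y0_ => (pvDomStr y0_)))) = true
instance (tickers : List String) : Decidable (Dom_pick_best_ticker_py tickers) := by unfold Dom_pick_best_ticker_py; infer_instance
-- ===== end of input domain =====

-- B replaces A's single tuple-key sort of the normalized set by one bucketing pass plus a
-- min over the first non-empty priority bucket (alternative decomposition, same return value).

-- ===== PORT A =====
-- A's helper `score` (the Int component of its tuple key)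
def pvScore (t : String) : Int :=
  if PySem.Str.endswith t "3" then 0
  else if PySem.Str.endswith t "4" then 1
  else if PySem.Str.endswith t "11" then 2
  else 9

def pick_best_ticker_py (tickers : List String) : Option String :=
  if tickers = [] then none
  else
    let uniq := PySem.List.sorted
      (PySem.Set.ofList ((tickers.filter (fun t => !(t == "") && !(PySem.Str.strip t == ""))).map
        (fun t => PySem.Str.upper (PySem.Str.strip t)))) (fun x => x) false
    if uniq = [] then none
    else (PySem.List.sorted2 uniq pvScore (fun t => t) false).head?

-- ===== PORT B =====
-- one pass over the normalized set: append each ticker to its priority bucket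
def pvBucketStep (b : List String × List String × List String × List String) (t : String) :
    List String × List String × List String × List String :=
  if PySem.Str.endswith t "3" then (b.1 ++ [t], b.2.1, b.2.2.1, b.2.2.2)
  else if PySem.Str.endswith t "4" then (b.1, b.2.1 ++ [t], b.2.2.1, b.2.2.2)
  else if PySem.Str.endswith t "11" then (b.1, b.2.1, b.2.2.1 ++ [t], b.2.2.2)
  else (b.1, b.2.1, b.2.2.1, b.2.2.2 ++ [t])

def pick_best_ticker_py_alt (tickers : List String) : Option String :=
  let norm := PySem.Set.ofList ((tickers.filter (fun t => !(t == "") && !(PySem.Str.strip t == ""))).map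
    (fun t => PySem.Str.upper (PySem.Str.strip t)))
  if norm = [] then none
  else
    let b := norm.foldl pvBucketStep ([], [], [], [])
    if b.1 ≠ [] then PySem.List.min? b.1 (fun x => x)
    else if b.2.1 ≠ [] then PySem.List.min? b.2.1 (fun x => x)
    else if b.2.2.1 ≠ [] then PySem.List.min? b.2.2.1 (fun x => x)
    else if b.2.2.2 ≠ [] then PySem.List.min? b.2.2.2 (fun x => x)
    else none

-- ===== PRECONDITION & SPEC =====
def Spec_pick_best_ticker_py (tickers : List String) (out : Option String) : Prop := out = pick_best_ticker_py_alt tickers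
instance (tickers : List String) (out : Option String) : Decidable (Spec_pick_best_ticker_py tickers out) := by unfold Spec_pick_best_ticker_py; infer_instance

-- ===== CLAIM (what is proved, stated in full; the proofs are below) =====
def Claim_equal_pick_best_ticker_py : Prop := ∀ (tickers : List String), Dom_pick_best_ticker_py tickers → Spec_pick_best_ticker_py tickers (pick_best_ticker_py tickers)

-- ===== LEMMAS AND PROOFS =====

-- the strict lexicographic comparison A's stable sort uses on the tuple key (score t, t)
def pvBf (a b : String) : Bool :=
  decide (pvScore a < pvScore b) || (!decide (pvScore b < pvScore a) && decide (a < b))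

def pvStep (acc : Option String) (x : String) : Option String :=
  match acc with
  | none => some x
  | some m => if pvBf x m then some x else some m

def pvMin? (xs : List String) : Option String := xs.foldl pvStep none

def pvIsMin (xs : List String) (m : String) : Prop := m ∈ xs ∧ ∀ y ∈ xs, pvBf y m = false

lemma pvBf_iff (a b : String) :
    pvBf a b = true ↔ (pvScore a < pvScore b ∨ (pvScore a = pvScore b ∧ a < b)) := by
  rcases lt_trichotomy (pvScore a) (pvScore b) with h | h | h
  · simp [pvBf, h, lt_asymm h]
  · simp [pvBf, h]
  · simp [pvBf, h, lt_asymm h, h.ne']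

lemma pvBf_false_iff (a b : String) :
    pvBf a b = false ↔ (pvScore b < pvScore a ∨ (pvScore a = pvScore b ∧ ¬ a < b)) := by
  rcases lt_trichotomy (pvScore a) (pvScore b) with h | h | h
  · simp [pvBf, h, lt_asymm h, h.ne]
  · simp [pvBf, h]
  · simp [pvBf, h, lt_asymm h]

lemma pvBf_irrefl (a : String) : pvBf a a = false := by
  rw [pvBf_false_iff]; exact Or.inr ⟨rfl, lt_irrefl a⟩

lemma pvBf_asymm {a b : String} (h1 : pvBf a b = false) (h2 : pvBf b a = false) : a = b := by
  rw [pvBf_false_iff] at h1 h2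
  rcases h1 with h1 | ⟨e1, n1⟩ <;> rcases h2 with h2 | ⟨e2, n2⟩
  · omega
  · omega
  · omega
  · exact le_antisymm (not_lt.mp n2) (not_lt.mp n1)

lemma pvBf_trans {a b c : String} (h1 : pvBf a b = true) (h2 : pvBf b c = true) :
    pvBf a c = true := by
  rw [pvBf_iff] at h1 h2 ⊢
  rcases h1 with h1 | ⟨e1, l1⟩ <;> rcases h2 with h2 | ⟨e2, l2⟩
  · exact Or.inl (by omega)
  · exact Or.inl (by omega)
  · exact Or.inl (by omega)
  · exact Or.inr ⟨by omega, lt_trans l1 l2⟩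

lemma pvIsMin_unique {xs : List String} {m m' : String}
    (h : pvIsMin xs m) (h' : pvIsMin xs m') : m = m' :=
  pvBf_asymm (h'.2 m h.1) (h.2 m' h'.1)

-- ===== A-side: head of the sorted2 insertion-sort is the fold-min under pvBf =====

lemma head?_insertBy (x : String) (acc : List String) :
    (PySem.List.insertBy pvBf x acc).head? = pvStep acc.head? x := by
  cases acc with
  | nil => rfl
  | cons y ys =>
    simp only [PySem.List.insertBy, pvStep, List.head?_cons]
    split_ifs <;> rfl

lemma head?_fold_insertBy (xs : List String) :
    ∀ acc : List String,
      (xs.foldl (fun acc x => PySem.List.insertBy pvBf x acc) acc).head? = xs.foldl pvStep acc.head? := by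
  induction xs with
  | nil => intro acc; rfl
  | cons x xs ih =>
    intro acc
    simp only [List.foldl_cons, ih, head?_insertBy]

lemma sorted2_head_eq (xs : List String) :
    (PySem.List.sorted2 xs pvScore (fun t => t) false).head? = pvMin? xs := by
  have h : PySem.List.sorted2 xs pvScore (fun t => t) false
      = xs.foldl (fun acc x => PySem.List.insertBy pvBf x acc) [] := rfl
  rw [h, head?_fold_insertBy]; rfl

lemma pvFold_spec (xs : List String) :
    ∀ m : String, ∃ r, xs.foldl pvStep (some m) = some r ∧ r ∈ m :: xs ∧
      pvBf m r = false ∧ ∀ y ∈ xs, pvBf y r = false := by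
  induction xs with
  | nil =>
    intro m
    exact ⟨m, rfl, List.mem_cons_self, pvBf_irrefl m, by simp⟩
  | cons x xs ih =>
    intro m
    by_cases h : pvBf x m = true
    · obtain ⟨r, hr, hmem, hbr, hall⟩ := ih x
      refine ⟨r, ?_, ?_, ?_, ?_⟩
      · simp only [List.foldl_cons, pvStep, h, if_pos]; exact hr
      · rcases List.mem_cons.mp hmem with h' | h'
        · exact h' ▸ List.mem_cons_of_mem _ List.mem_cons_self
        · exact List.mem_cons_of_mem _ (List.mem_cons_of_mem _ h')
      · by_contra hc
        have : pvBf m r = true := by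
          cases hmr : pvBf m r with
          | true => rfl
          | false => exact absurd hmr hc
        exact absurd (pvBf_trans h this) (by simp [hbr])
      · intro y hy
        rcases List.mem_cons.mp hy with h' | h'
        · exact h' ▸ hbr
        · exact hall y h'
    · obtain ⟨r, hr, hmem, hbr, hall⟩ := ih m
      have hstep : pvStep (some m) x = some m := by
        simp only [pvStep]
        rw [if_neg (by simpa using h)]
      refine ⟨r, ?_, ?_, hbr, ?_⟩
      · simp only [List.foldl_cons, hstep]; exact hr
      · rcases List.mem_cons.mp hmem with h' | h'
        · exact h' ▸ List.mem_cons_self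
        · exact List.mem_cons_of_mem _ (List.mem_cons_of_mem _ h')
      · intro y hy
        rcases List.mem_cons.mp hy with h' | h'
        · subst h'
          -- y = x, discarded because pvBf x m = false; r is below m
          cases hxr : pvBf y r with
          | false => rfl
          | true =>
            exfalso
            rw [pvBf_false_iff] at hbr
            have h' : pvBf y m = false := by simpa using h
            rw [pvBf_false_iff] at h'
            rw [pvBf_iff] at hxr
            have hrm : pvScore r ≤ pvScore m := by rcases hbr with hb | ⟨hb, _⟩ <;> omega
            have hmy : pvScore m ≤ pvScore y := by rcases h' with hm | ⟨hm, _⟩ <;> omega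
            rcases hxr with hs | ⟨hs, hl⟩
            · omega
            · have hbr' : ¬ m < r := by
                rcases hbr with hb | ⟨_, nb⟩
                · omega
                · exact nb
              have h'' : ¬ y < m := by
                rcases h' with hm | ⟨_, nm⟩
                · omega
                · exact nm
              exact absurd (lt_of_lt_of_le hl (le_trans (not_lt.mp hbr') (not_lt.mp h''))) (lt_irrefl y)
        · exact hall y h'

lemma pvMin?_spec (xs : List String) (h : xs ≠ []) :
    ∃ m, pvMin? xs = some m ∧ pvIsMin xs m := by
  cases xs with
  | nil => exact absurd rfl h
  | cons x xs =>
    obtain ⟨r, hr, hmem, hbr, hall⟩ := pvFold_spec xs x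
    refine ⟨r, ?_, hmem, ?_⟩
    · simp only [pvMin?, List.foldl_cons, pvStep]; exact hr
    · intro y hy
      rcases List.mem_cons.mp hy with h' | h'
      · exact h' ▸ hbr
      · exact hall y h'

-- ===== B-side: the bucket fold is four filters; the chain picks a pvBf-minimum =====

def pvF0 (t : String) : Bool := PySem.Str.endswith t "3"
def pvF1 (t : String) : Bool := !PySem.Str.endswith t "3" && PySem.Str.endswith t "4"
def pvF2 (t : String) : Bool :=
  !PySem.Str.endswith t "3" && !PySem.Str.endswith t "4" && PySem.Str.endswith t "11"
def pvF9 (t : String) : Bool :=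
  !PySem.Str.endswith t "3" && !PySem.Str.endswith t "4" && !PySem.Str.endswith t "11"

lemma buckets_eq (xs : List String) :
    ∀ a b c d : List String,
      xs.foldl pvBucketStep (a, b, c, d) =
        (a ++ xs.filter pvF0, b ++ xs.filter pvF1, c ++ xs.filter pvF2, d ++ xs.filter pvF9) := by
  induction xs with
  | nil => intro a b c d; simp
  | cons x xs ih =>
    intro a b c d
    simp only [List.foldl_cons, pvBucketStep]
    cases h3 : PySem.Str.endswith x "3" <;>
      cases h4 : PySem.Str.endswith x "4" <;>
        cases h11 : PySem.Str.endswith x "11" <;>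
          simp only [List.filter_cons, pvF0, pvF1, pvF2, pvF9, h3, h4, h11, Bool.not_true,
            Bool.not_false, Bool.and_true, Bool.and_false,
            Bool.and_self, if_true] <;>
          simp [ih]

lemma score_f0 (t : String) : pvF0 t = true ↔ pvScore t = 0 := by
  unfold pvF0 pvScore; split_ifs <;> simp_all
lemma score_f1 (t : String) : pvF1 t = true ↔ pvScore t = 1 := by
  unfold pvF1 pvScore; split_ifs <;> simp_all
lemma score_f2 (t : String) : pvF2 t = true ↔ pvScore t = 2 := by
  unfold pvF2 pvScore; split_ifs <;> simp_all
lemma score_f9 (t : String) : pvF9 t = true ↔ pvScore t = 9 := by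
  unfold pvF9 pvScore; split_ifs <;> simp_all

lemma pvScore_cases (t : String) :
    pvScore t = 0 ∨ pvScore t = 1 ∨ pvScore t = 2 ∨ pvScore t = 9 := by
  unfold pvScore; split_ifs <;> simp

def pvSel (S : List String) : Option String :=
  if S.filter pvF0 ≠ [] then PySem.List.min? (S.filter pvF0) (fun x => x)
  else if S.filter pvF1 ≠ [] then PySem.List.min? (S.filter pvF1) (fun x => x)
  else if S.filter pvF2 ≠ [] then PySem.List.min? (S.filter pvF2) (fun x => x)
  else if S.filter pvF9 ≠ [] then PySem.List.min? (S.filter pvF9) (fun x => x)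
  else none

-- a pvBf-minimum from the min of one bucket, given every lower-priority bucket is empty
lemma bucket_min_isMin (S : List String) (f : String → Bool) (v : Int)
    (hf : ∀ t, f t = true ↔ pvScore t = v)
    (hlow : ∀ y ∈ S, ¬ pvScore y < v) {m : String}
    (hm : PySem.List.min? (S.filter f) (fun x => x) = some m) : pvIsMin S m := by
  have hmem : m ∈ S.filter f := PySem.List.min?_mem hm
  have hmS : m ∈ S := (List.mem_filter.mp hmem).1
  have hms : pvScore m = v := (hf m).mp (List.mem_filter.mp hmem).2
  refine ⟨hmS, fun y hy => ?_⟩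
  rw [pvBf_false_iff]
  rcases lt_trichotomy (pvScore y) (pvScore m) with h | h | h
  · exact absurd (hms ▸ h) (hlow y hy)
  · right
    refine ⟨h, ?_⟩
    have hyf : y ∈ S.filter f := List.mem_filter.mpr ⟨hy, (hf y).mpr (by omega)⟩
    exact not_lt.mpr (PySem.List.min?_isMin hm y hyf)
  · exact Or.inl h

lemma filter_empty_no_score (S : List String) (f : String → Bool) (v : Int)
    (hf : ∀ t, f t = true ↔ pvScore t = v) (he : S.filter f = []) :
    ∀ y ∈ S, pvScore y ≠ v := by
  intro y hy hv
  have : y ∈ S.filter f := List.mem_filter.mpr ⟨hy, (hf y).mpr hv⟩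
  simp [he] at this

lemma pvSel_isMin (S : List String) (h : S ≠ []) :
    ∃ m, pvSel S = some m ∧ pvIsMin S m := by
  unfold pvSel
  split_ifs with h0 h1 h2 h9
  · obtain ⟨m, hm⟩ := Option.ne_none_iff_exists'.mp
      (fun hn => h0 ((PySem.List.min?_eq_none_iff _ (fun x : String => x)).mp hn))
    refine ⟨m, hm, bucket_min_isMin S pvF0 0 score_f0 ?_ hm⟩
    intro y hy
    have := pvScore_cases y; omega
  · obtain ⟨m, hm⟩ := Option.ne_none_iff_exists'.mp
      (fun hn => h1 ((PySem.List.min?_eq_none_iff _ (fun x : String => x)).mp hn))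
    refine ⟨m, hm, bucket_min_isMin S pvF1 1 score_f1 ?_ hm⟩
    intro y hy
    have h0' := filter_empty_no_score S pvF0 0 score_f0 (not_ne_iff.mp h0) y hy
    have := pvScore_cases y; omega
  · obtain ⟨m, hm⟩ := Option.ne_none_iff_exists'.mp
      (fun hn => h2 ((PySem.List.min?_eq_none_iff _ (fun x : String => x)).mp hn))
    refine ⟨m, hm, bucket_min_isMin S pvF2 2 score_f2 ?_ hm⟩
    intro y hy
    have h0' := filter_empty_no_score S pvF0 0 score_f0 (not_ne_iff.mp h0) y hy
    have h1' := filter_empty_no_score S pvF1 1 score_f1 (not_ne_iff.mp h1) y hy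
    have := pvScore_cases y; omega
  · obtain ⟨m, hm⟩ := Option.ne_none_iff_exists'.mp
      (fun hn => h9 ((PySem.List.min?_eq_none_iff _ (fun x : String => x)).mp hn))
    refine ⟨m, hm, bucket_min_isMin S pvF9 9 score_f9 ?_ hm⟩
    intro y hy
    have h0' := filter_empty_no_score S pvF0 0 score_f0 (not_ne_iff.mp h0) y hy
    have h1' := filter_empty_no_score S pvF1 1 score_f1 (not_ne_iff.mp h1) y hy
    have h2' := filter_empty_no_score S pvF2 2 score_f2 (not_ne_iff.mp h2) y hy
    have := pvScore_cases y; omega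
  · exfalso
    obtain ⟨x, hx⟩ := List.exists_mem_of_ne_nil S h
    have h0' := filter_empty_no_score S pvF0 0 score_f0 (not_ne_iff.mp h0) x hx
    have h1' := filter_empty_no_score S pvF1 1 score_f1 (not_ne_iff.mp h1) x hx
    have h2' := filter_empty_no_score S pvF2 2 score_f2 (not_ne_iff.mp h2) x hx
    have h9' := filter_empty_no_score S pvF9 9 score_f9 (not_ne_iff.mp h9) x hx
    have := pvScore_cases x; omega

-- ===== VERDICT (by name: the statement is the Claim_ definition above) =====
theorem pick_best_ticker_py_spec : Claim_equal_pick_best_ticker_py := by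
  intro tickers _dom
  unfold Spec_pick_best_ticker_py pick_best_ticker_py pick_best_ticker_py_alt
  by_cases ht : tickers = []
  · subst ht; rfl
  rw [if_neg ht]
  set S : List String :=
    PySem.Set.ofList ((tickers.filter (fun t => !(t == "") && !(PySem.Str.strip t == ""))).map
      (fun t => PySem.Str.upper (PySem.Str.strip t))) with hSdef
  simp only []
  by_cases hS : S = []
  · rw [hS]; rfl
  have hsortne : PySem.List.sorted S (fun x => x) false ≠ [] := by
    intro hc; exact hS ((PySem.List.sorted_eq_nil_iff _ _ _).mp hc)
  rw [if_neg hsortne, if_neg hS]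
  rw [buckets_eq S [] [] [] []]
  simp only [List.nil_append]
  obtain ⟨mA, hA, hAmin⟩ := pvMin?_spec _ hsortne
  obtain ⟨mB, hB, hBmin⟩ := pvSel_isMin S hS
  have hAminS : pvIsMin S mA := by
    refine ⟨(PySem.List.mem_sorted _ _ _ _).mp hAmin.1, fun y hy => ?_⟩
    exact hAmin.2 y ((PySem.List.mem_sorted _ _ _ _).mpr hy)
  rw [sorted2_head_eq, hA]
  have hBeq : (if S.filter pvF0 ≠ [] then PySem.List.min? (S.filter pvF0) (fun x => x)
      else if S.filter pvF1 ≠ [] then PySem.List.min? (S.filter pvF1) (fun x => x)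
      else if S.filter pvF2 ≠ [] then PySem.List.min? (S.filter pvF2) (fun x => x)
      else if S.filter pvF9 ≠ [] then PySem.List.min? (S.filter pvF9) (fun x => x)
      else none) = some mB := hB
  rw [hBeq]
  exact congrArg some (pvIsMin_unique hAminS hBmin)
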